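-- pv_equiv track=rewrite | github.com/QwQ-maker/4box | sbox_analysis.py | compute_algebraic_degree
-- ===== SOURCE A (Python) =====
-- def hamming_weight(val):
--     """计算整数的汉明重量（二进制中1的个数）"""
--     count = 0
--     while val:
--         count += val & 1
--         val >>= 1
--     return count
--
-- def compute_algebraic_degree(anf_coeffs, n):
--     """计算布尔函数的代数次数"""
--     max_deg = 0
--     size = 1 << n
--     for k in range(size):
--         if anf_coeffs[k] == 1:
--             deg = hamming_weight(k)
--             if deg > max_deg:
--                 max_deg = deg
--     return max_deg
-- ===== SOURCE B (Python) =====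
-- def _weight(k):
--     return 0 if k <= 0 else (k & 1) + _weight(k >> 1)
--
-- def compute_algebraic_degree(anf_coeffs, n):
--     size = 1 << n
--     w = n
--     while w > 0:
--         if any(anf_coeffs[k] == 1 and _weight(k) == w for k in range(size)):
--             return w
--         w -= 1
--     return 0
-- ===== Notes on version B (the rewrite author's own statement) =====
-- stated objective: alternative
-- what changed: Replaces A's flat scan of all 2^n coefficients with a running max by a descending search over candidate degrees w = n..1 that returns the first w for which some set coefficient has Hamming weight w.
import Mathlib
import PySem

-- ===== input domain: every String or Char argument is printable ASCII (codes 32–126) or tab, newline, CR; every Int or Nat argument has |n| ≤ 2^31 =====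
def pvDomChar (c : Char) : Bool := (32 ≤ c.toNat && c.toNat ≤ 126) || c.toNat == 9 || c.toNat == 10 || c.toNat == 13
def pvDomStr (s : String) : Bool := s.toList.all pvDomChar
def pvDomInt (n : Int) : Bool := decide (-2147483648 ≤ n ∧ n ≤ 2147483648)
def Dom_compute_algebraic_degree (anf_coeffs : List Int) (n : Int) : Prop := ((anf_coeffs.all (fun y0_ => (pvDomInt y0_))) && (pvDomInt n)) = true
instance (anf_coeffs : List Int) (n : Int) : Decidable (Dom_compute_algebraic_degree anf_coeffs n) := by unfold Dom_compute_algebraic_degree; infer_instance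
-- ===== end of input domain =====

-- B replaces A's flat max-tracking scan of all 2^n ANF coefficients by a descending
-- search over candidate degrees w = n, n-1, …, 1 that returns the first w for which some
-- set coefficient has Hamming weight w (objective: alternative decomposition, same cost).

-- ===== PORT A =====
-- the port's single-step shift, as Nat division (used by the termination proofs)
lemma pvShiftRight_one (k : Int) (hk : 0 ≤ k) : k >>> (1 : Int) = ((k.toNat / 2 : Nat) : Int) := by
  have h0 : k = ((k.toNat : Nat) : Int) := by omega
  rw [h0]
  have := Int.shiftRight_natCast k.toNat 1
  simpa [Nat.shiftRight_eq_div_pow] using this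

-- Python's 'while val:' loops forever on negative val; the port guards with 0 < val,
-- exact for the val ≥ 0 it is called on (indices k of range(1 << n)).
def hamming_weight (val : Int) : Int :=
  if _h : 0 < val then PySem.Int.band val 1 + hamming_weight (val >>> (1 : Int))
  else 0
termination_by val.toNat
decreasing_by
  rw [pvShiftRight_one val (by omega)]
  omega

-- anf_coeffs[k] == 1 is ported as pyGet? = some 1; out-of-range k (IndexError) is excluded by Pre_.
def compute_algebraic_degree (anf_coeffs : List Int) (n : Int) : Int :=
  let size : Int := (1 : Int) <<< ((n.toNat : Nat) : Int)
  (PySem.List.pyRange 0 size 1).foldl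
    (fun max_deg k =>
      if PySem.List.pyGet? anf_coeffs k = some 1 then
        (if hamming_weight k > max_deg then hamming_weight k else max_deg)
      else max_deg) 0

-- ===== PORT B =====
def pv_weight (k : Int) : Int :=
  if _h : k ≤ 0 then 0
  else PySem.Int.band k 1 + pv_weight (k >>> (1 : Int))
termination_by k.toNat
decreasing_by
  rw [pvShiftRight_one k (by omega)]
  omega

-- the 'while w > 0: … return w … w -= 1' loop of Source B
def pv_degree_loop (anf_coeffs : List Int) (size : Int) (w : Int) : Int :=
  if h : 0 < w then
    if (PySem.List.pyRange 0 size 1).any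
        (fun k => PySem.List.pyGet? anf_coeffs k == some 1 && pv_weight k == w)
    then w
    else pv_degree_loop anf_coeffs size (w - 1)
  else 0
termination_by w.toNat
decreasing_by omega

def compute_algebraic_degree_alt (anf_coeffs : List Int) (n : Int) : Int :=
  let size : Int := (1 : Int) <<< ((n.toNat : Nat) : Int)
  pv_degree_loop anf_coeffs size n

-- ===== PRECONDITION & SPEC =====
-- Exactly the inputs on which the Python A returns: n ≥ 0 (1 << n raises ValueError on
-- negative n) and the coefficient list covers all 2^n indices (else IndexError).
def Pre_compute_algebraic_degree (anf_coeffs : List Int) (n : Int) : Prop :=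
  0 ≤ n ∧ 2 ^ n.toNat ≤ anf_coeffs.length
instance (anf_coeffs : List Int) (n : Int) : Decidable (Pre_compute_algebraic_degree anf_coeffs n) := by
  unfold Pre_compute_algebraic_degree; infer_instance
def pvWitness_compute_algebraic_degree : List Int × Int := ([1, 0, 1, 1], 2)

def Spec_compute_algebraic_degree (anf_coeffs : List Int) (n : Int) (out : Int) : Prop := out = compute_algebraic_degree_alt anf_coeffs n
instance (anf_coeffs : List Int) (n : Int) (out : Int) : Decidable (Spec_compute_algebraic_degree anf_coeffs n out) := by unfold Spec_compute_algebraic_degree; infer_instance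

-- ===== CLAIM (what is proved, stated in full; the proofs are below) =====
def Claim_equal_compute_algebraic_degree : Prop := ∀ (anf_coeffs : List Int) (n : Int), Dom_compute_algebraic_degree anf_coeffs n → Pre_compute_algebraic_degree anf_coeffs n → Spec_compute_algebraic_degree anf_coeffs n (compute_algebraic_degree anf_coeffs n)

-- ===== LEMMAS AND PROOFS =====

-- A's loop body, named for the proofs
def pvStepA (anf_coeffs : List Int) (max_deg k : Int) : Int :=
  if PySem.List.pyGet? anf_coeffs k = some 1 then
    (if hamming_weight k > max_deg then hamming_weight k else max_deg)
  else max_deg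

lemma pvA_eq_fold (anf_coeffs : List Int) (n : Int) :
    compute_algebraic_degree anf_coeffs n =
      (PySem.List.pyRange 0 ((1 : Int) <<< ((n.toNat : Nat) : Int)) 1).foldl (pvStepA anf_coeffs) 0 := rfl

-- unfolding equations of the weight helpers
lemma hw_nonpos (k : Int) (h : k ≤ 0) : hamming_weight k = 0 := by
  rw [hamming_weight.eq_def]; simp; omega

lemma hw_pos (k : Int) (h : 0 < k) :
    hamming_weight k = ((k.toNat % 2 : Nat) : Int) + hamming_weight ((k.toNat / 2 : Nat) : Int) := by
  rw [hamming_weight.eq_def, dif_pos h, pvShiftRight_one k (le_of_lt h)]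
  have hb : PySem.Int.band k 1 = ((k.toNat % 2 : Nat) : Int) := by
    have h0 : k = ((k.toNat : Nat) : Int) := by omega
    rw [h0]
    have := PySem.Int.band_natCast k.toNat 1
    simpa [Nat.and_one_is_mod] using this
  rw [hb]

-- the two weight helpers agree
lemma pv_weight_eq_aux : ∀ (t : Nat) (k : Int), k.toNat ≤ t → pv_weight k = hamming_weight k := by
  intro t
  induction t with
  | zero =>
      intro k hk
      have h : k ≤ 0 := by omega
      rw [pv_weight.eq_def, dif_pos h, hw_nonpos k h]
  | succ i ih =>
      intro k hk
      by_cases h : k ≤ 0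
      · rw [pv_weight.eq_def, dif_pos h, hw_nonpos k h]
      · rw [pv_weight.eq_def, dif_neg h, hw_pos k (by omega),
          pvShiftRight_one k (by omega)]
        have hb : PySem.Int.band k 1 = ((k.toNat % 2 : Nat) : Int) := by
          have h0 : k = ((k.toNat : Nat) : Int) := by omega
          rw [h0]
          have := PySem.Int.band_natCast k.toNat 1
          simpa [Nat.and_one_is_mod] using this
        rw [hb, ih ((k.toNat / 2 : Nat) : Int) (by omega)]

lemma pv_weight_eq (k : Int) : pv_weight k = hamming_weight k :=
  pv_weight_eq_aux k.toNat k le_rfl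

-- a k < 2^m has Hamming weight at most m
lemma hw_le (m : Nat) : ∀ k : Nat, k < 2 ^ m → hamming_weight (k : Int) ≤ (m : Int) := by
  induction m with
  | zero =>
      intro k hk
      interval_cases k
      rw [show ((0:Nat):Int) = 0 from rfl, hw_nonpos 0 le_rfl]
  | succ i ih =>
      intro k hk
      rcases Nat.eq_zero_or_pos k with h0 | h0
      · subst h0
        rw [show ((0:Nat):Int) = 0 from rfl, hw_nonpos 0 le_rfl]
        omega
      · rw [hw_pos (k : Int) (by omega)]
        have hc : ((k : Int)).toNat = k := by omega
        rw [hc]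
        have h2 : k / 2 < 2 ^ i := by omega
        have h3 := ih (k / 2) h2
        have h4 : (k % 2 : Nat) ≤ 1 := by omega
        omega

-- fold facts
lemma foldA_ge (anf : List Int) : ∀ (l : List Int) (acc : Int), acc ≤ l.foldl (pvStepA anf) acc := by
  intro l
  induction l with
  | nil => simp
  | cons x xs ih =>
      intro acc
      have h1 : acc ≤ pvStepA anf acc x := by unfold pvStepA; split_ifs <;> omega
      calc acc ≤ pvStepA anf acc x := h1
        _ ≤ _ := ih _

lemma foldA_mem_le (anf : List Int) : ∀ (l : List Int) (acc k : Int), k ∈ l →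
    PySem.List.pyGet? anf k = some 1 → hamming_weight k ≤ l.foldl (pvStepA anf) acc := by
  intro l
  induction l with
  | nil => simp
  | cons x xs ih =>
      intro acc k hk hp
      rcases List.mem_cons.mp hk with h | h
      · subst h
        have h1 : hamming_weight k ≤ pvStepA anf acc k := by
          unfold pvStepA; rw [if_pos hp]; split_ifs <;> omega
        calc hamming_weight k ≤ pvStepA anf acc k := h1
          _ ≤ _ := foldA_ge anf xs _
      · exact ih _ k h hp

lemma foldA_char (anf : List Int) : ∀ (l : List Int) (acc : Int),
    l.foldl (pvStepA anf) acc = acc ∨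
      ∃ k ∈ l, PySem.List.pyGet? anf k = some 1 ∧
        hamming_weight k = l.foldl (pvStepA anf) acc := by
  intro l
  induction l with
  | nil => intro acc; left; rfl
  | cons x xs ih =>
      intro acc
      rcases ih (pvStepA anf acc x) with h | ⟨k, hk, hp, he⟩
      · rw [List.foldl_cons, h]
        unfold pvStepA
        split_ifs with h1 h2
        · right; exact ⟨x, List.mem_cons_self, h1, rfl⟩
        · left; rfl
        · left; rfl
      · right; exact ⟨k, List.mem_cons_of_mem _ hk, hp, he⟩

-- the descending loop of B finds exactly A's maximum
lemma pv_loop_finds (anf : List Int) (size : Int) :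
    ∀ (t : Nat) (w : Int), w.toNat = t → 0 ≤ w →
      (PySem.List.pyRange 0 size 1).foldl (pvStepA anf) 0 ≤ w →
      pv_degree_loop anf size w = (PySem.List.pyRange 0 size 1).foldl (pvStepA anf) 0 := by
  intro t
  induction t with
  | zero =>
      intro w hwt hw0 hM
      have hw : ¬ 0 < w := by omega
      rw [pv_degree_loop.eq_def, dif_neg hw]
      have := foldA_ge anf (PySem.List.pyRange 0 size 1) 0
      omega
  | succ i ih =>
      intro w hwt hw0 hM
      have hw : 0 < w := by omega
      rw [pv_degree_loop.eq_def, dif_pos hw]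
      by_cases hany : (PySem.List.pyRange 0 size 1).any
          (fun k => PySem.List.pyGet? anf k == some 1 && pv_weight k == w) = true
      · rw [if_pos hany]
        rcases List.any_eq_true.mp hany with ⟨k, hk, hpk⟩
        simp only [Bool.and_eq_true, beq_iff_eq] at hpk
        have hle := foldA_mem_le anf (PySem.List.pyRange 0 size 1) 0 k hk hpk.1
        rw [pv_weight_eq] at hpk
        omega
      · rw [if_neg hany]
        have hnot : ∀ k ∈ PySem.List.pyRange 0 size 1,
            PySem.List.pyGet? anf k = some 1 → hamming_weight k ≠ w := by
          intro k hk hp he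
          exact hany (List.any_eq_true.mpr ⟨k, hk, by
            simp only [Bool.and_eq_true, beq_iff_eq]
            exact ⟨hp, by rw [pv_weight_eq]; exact he⟩⟩)
        have hM' : (PySem.List.pyRange 0 size 1).foldl (pvStepA anf) 0 ≤ w - 1 := by
          rcases foldA_char anf (PySem.List.pyRange 0 size 1) 0 with h | ⟨k, hk, hp, he⟩
          · omega
          · have := hnot k hk hp
            omega
        exact ih (w - 1) (by omega) (by
          have := foldA_ge anf (PySem.List.pyRange 0 size 1) 0
          omega) hM'

lemma shl_eq_pow (m : Nat) : (1 : Int) <<< ((m : Nat) : Int) = ((2 ^ m : Nat) : Int) :=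
  Int.one_shiftLeft m

-- ===== VERDICT (by name: the statement is the Claim_ definition above) =====
theorem compute_algebraic_degree_spec : Claim_equal_compute_algebraic_degree := by
  intro anf n _hDom hPre
  obtain ⟨hn, _hlen⟩ := hPre
  unfold Spec_compute_algebraic_degree
  rw [pvA_eq_fold]
  show _ = compute_algebraic_degree_alt anf n
  unfold compute_algebraic_degree_alt
  rw [eq_comm]
  apply pv_loop_finds anf _ n.toNat n rfl hn
  -- A's maximum is at most n: every index k of range(2^n) has weight ≤ n
  rcases foldA_char anf (PySem.List.pyRange 0 ((1 : Int) <<< ((n.toNat : Nat) : Int)) 1) 0 with h | ⟨k, hk, _hp, he⟩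
  · omega
  · rw [← he]
    rw [shl_eq_pow] at hk
    rw [PySem.List.mem_pyRange_one] at hk
    have hk0 : 0 ≤ k := hk.1
    have hklt : k.toNat < 2 ^ n.toNat := by
      have := hk.2
      omega
    have := hw_le n.toNat k.toNat hklt
    have hkc : ((k.toNat : Nat) : Int) = k := by omega
    rw [hkc] at this
    omega
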